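-- pv_equiv track=rewrite | github.com/innewiadro/Codewars | kata_level7/Squad_number_generator/Squad_number_generator.py | generate_number
-- ===== SOURCE A (Python) =====
-- def generate_number(squad, n):
--     if n not in squad:
--         return n
--
--     for i in range(1, 10):
--         for j in range(1, 10):
--             if i + j == n:
--                 candidate = int(f"{i}{j}")
--                 if candidate not in squad:
--                     return candidate
--     return None
-- ===== SOURCE B (Python) =====
-- def generate_number(squad, n):
--     if n not in squad:
--         return n
--     for i in range(1, 10):
--         j = n - i
--         if 1 <= j <= 9:
--             candidate = 10 * i + j
--             if candidate not in squad:
--                 return candidate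
--     return None
-- ===== Notes on version B (the rewrite author's own statement) =====
-- stated objective: simpler
-- what changed: Replaces the nested 9x9 enumeration of all digit pairs with a single pass over i=1..9 that computes the unique partner j=n-i directly and forms the candidate arithmetically as 10*i+j instead of via string formatting and int().
import Mathlib
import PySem

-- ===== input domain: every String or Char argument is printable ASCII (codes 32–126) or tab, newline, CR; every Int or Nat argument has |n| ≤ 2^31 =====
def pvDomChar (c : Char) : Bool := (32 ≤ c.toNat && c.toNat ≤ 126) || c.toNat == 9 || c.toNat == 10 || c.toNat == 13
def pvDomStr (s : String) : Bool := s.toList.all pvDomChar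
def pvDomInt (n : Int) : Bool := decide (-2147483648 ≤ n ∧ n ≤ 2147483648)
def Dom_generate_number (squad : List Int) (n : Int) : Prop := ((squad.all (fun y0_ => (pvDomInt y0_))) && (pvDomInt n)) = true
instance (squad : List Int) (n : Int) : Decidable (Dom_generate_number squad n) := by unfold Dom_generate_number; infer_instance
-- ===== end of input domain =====

-- B replaces A's nested 9x9 digit-pair enumeration by a single pass computing j = n - i directly (simpler; same return values everywhere).

-- ===== PORT A =====
-- inner 'for j in range(1,10)' loop of A; on int() failure Python would raise, but
-- f"{i}{j}" with i,j ∈ 1..9 always parses, so the 'none' branch is unreachable here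
def genAInner (squad : List Int) (n i : Int) : List Int → Option Int
  | [] => none
  | j :: js =>
    if i + j == n then
      match PySem.Int.ofStr? (PySem.Int.toStr i ++ PySem.Int.toStr j) with
      | none => none
      | some candidate =>
        if !(squad.contains candidate) then some candidate
        else genAInner squad n i js
    else genAInner squad n i js

-- outer 'for i in range(1,10)' loop of A
def genAOuter (squad : List Int) (n : Int) : List Int → Option Int
  | [] => none
  | i :: is =>
    match genAInner squad n i (PySem.List.pyRange 1 10 1) with
    | some c => some c
    | none => genAOuter squad n is

def generate_number (squad : List Int) (n : Int) : Option Int :=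
  if !(squad.contains n) then some n
  else genAOuter squad n (PySem.List.pyRange 1 10 1)

-- ===== PORT B =====
-- single 'for i in range(1,10)' loop of B, with j = n - i computed directly
def genBLoop (squad : List Int) (n : Int) : List Int → Option Int
  | [] => none
  | i :: is =>
    let j := n - i
    if 1 ≤ j ∧ j ≤ 9 then
      let candidate := 10 * i + j
      if !(squad.contains candidate) then some candidate
      else genBLoop squad n is
    else genBLoop squad n is

def generate_number_alt (squad : List Int) (n : Int) : Option Int :=
  if !(squad.contains n) then some n
  else genBLoop squad n (PySem.List.pyRange 1 10 1)

-- ===== PRECONDITION & SPEC =====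
def Spec_generate_number (squad : List Int) (n : Int) (out : Option Int) : Prop := out = generate_number_alt squad n
instance (squad : List Int) (n : Int) (out : Option Int) : Decidable (Spec_generate_number squad n out) := by unfold Spec_generate_number; infer_instance

-- ===== CLAIM (what is proved, stated in full; the proofs are below) =====
def Claim_equal_generate_number : Prop := ∀ (squad : List Int) (n : Int), Dom_generate_number squad n → Spec_generate_number squad n (generate_number squad n)

-- ===== LEMMAS AND PROOFS =====

-- concatenating the decimal strings of two digits 1..9 parses to 10*i + j
theorem parse_concat_digits (i j : Int) (hi1 : 1 ≤ i) (hi9 : i ≤ 9) (hj1 : 1 ≤ j) (hj9 : j ≤ 9) :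
    PySem.Int.ofStr? (PySem.Int.toStr i ++ PySem.Int.toStr j) = some (10 * i + j) := by
  interval_cases i <;> interval_cases j <;> decide

-- A's inner loop, over a list of candidate j's all in 1..9, returns the candidate for j = n-i
-- exactly when n-i is in the list and 10*i+(n-i) is not already taken, else none
theorem genAInner_eq (squad : List Int) (n i : Int) (hi1 : 1 ≤ i) (hi9 : i ≤ 9)
    (js : List Int) (hjs : ∀ j ∈ js, 1 ≤ j ∧ j ≤ 9) :
    genAInner squad n i js =
      if (n - i) ∈ js ∧ !(squad.contains (10 * i + (n - i))) then some (10 * i + (n - i)) else none := by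
  induction js with
  | nil => simp [genAInner]
  | cons j js ih =>
    have hj := hjs j (by simp)
    have hrest : ∀ x ∈ js, 1 ≤ x ∧ x ≤ 9 := fun x hx => hjs x (by simp [hx])
    by_cases h : i + j = n
    · have hjn : j = n - i := by omega
      subst hjn
      simp only [genAInner, h, beq_iff_eq,
        parse_concat_digits i (n - i) hi1 hi9 hj.1 hj.2]
      by_cases hc : (10 * i + (n - i)) ∈ squad
      · simp [hc, ih hrest]
      · simp [hc]
    · have hne : j ≠ n - i := by omega
      have : (i + j == n) = false := by simp; omega
      simp only [genAInner, this, Bool.false_eq_true, if_false, ih hrest]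
      have hmem : (n - i ∈ j :: js) ↔ (n - i ∈ js) := by
        simp only [List.mem_cons]
        constructor
        · intro h'
          rcases h' with h' | h'
          · omega
          · exact h'
        · exact Or.inr
      simp [hmem]

-- step-for-step agreement of the two outer loops over any list of i's in 1..9
theorem outer_eq (squad : List Int) (n : Int) (is : List Int) (his : ∀ i ∈ is, 1 ≤ i ∧ i ≤ 9) :
    genAOuter squad n is = genBLoop squad n is := by
  induction is with
  | nil => rfl
  | cons i is ih =>
    have hi := his i (by simp)
    have hrest : ∀ x ∈ is, 1 ≤ x ∧ x ≤ 9 := fun x hx => his x (by simp [hx])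
    have hinner := genAInner_eq squad n i hi.1 hi.2 (PySem.List.pyRange 1 10 1)
      (by intro j hj; rw [PySem.List.mem_pyRange_one] at hj; omega)
    have hmem : (n - i) ∈ PySem.List.pyRange 1 10 1 ↔ (1 ≤ n - i ∧ n - i ≤ 9) := by
      rw [PySem.List.mem_pyRange_one]; omega
    simp only [genAOuter, genBLoop, hinner, hmem, ih hrest]
    by_cases h1 : 1 ≤ n - i ∧ n - i ≤ 9
    · by_cases h2 : (10 * i + (n - i)) ∈ squad
      · simp [h1, h2]
      · simp [h1, h2]
    · have h1' : ¬(1 ≤ n - i ∧ n ≤ 9 + i) := by omega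
      simp [h1']

-- ===== VERDICT (by name: the statement is the Claim_ definition above) =====
theorem generate_number_spec : Claim_equal_generate_number := by
  intro squad n _
  unfold Spec_generate_number generate_number generate_number_alt
  have houter := outer_eq squad n (PySem.List.pyRange 1 10 1)
    (by intro i hi; rw [PySem.List.mem_pyRange_one] at hi; omega)
  by_cases h : squad.contains n
  · simp only [h, Bool.not_true, Bool.false_eq_true, if_false]
    exact houter
  · simp [houter]
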